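-- pv_equiv track=rewrite | github.com/penM000/ayame-api | python_script/main.py | same_dictionary_check
-- ===== SOURCE A (Python) =====
-- import copy
--
-- def same_dictionary_check(dict1, dict2, exclusion_key_list=["date"]):
--     """
--     辞書が同じならTrue
--     """
--     # 辞書の独立化
--     copy_dict1, copy_dict2 = copy.copy(dict1), copy.copy(dict2)
--     for exclusion_key in exclusion_key_list:
--         try:
--             del copy_dict1[exclusion_key]
--         except KeyError:
--             pass
--
--         try:
--             del copy_dict2[exclusion_key]
--         except KeyError:
--             pass
--     if copy_dict1 == copy_dict2:
--         return True
--     else: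
--         return False
-- ===== SOURCE B (Python) =====
-- def _canon(d, exclusion_set):
--     # canonical form: key-sorted association list of the non-excluded items
--     return sorted((item for item in d.items() if item[0] not in exclusion_set),
--                   key=lambda item: item[0])
--
-- def same_dictionary_check(dict1, dict2, exclusion_key_list=["date"]):
--     """
--     辞書が同じならTrue
--     """
--     exclusion_set = set(exclusion_key_list)
--     return _canon(dict1, exclusion_set) == _canon(dict2, exclusion_set)
-- ===== Notes on version B (the rewrite author's own statement) =====
-- stated objective: alternative
-- what changed: A copies both dicts, deletes each exclusion key with try/except and compares the dicts; B instead builds a canonical form of each dict - the key-sorted association list of its non-excluded items (exclusion keys held in a set) - and compares the two sorted lists.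
import Mathlib
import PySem

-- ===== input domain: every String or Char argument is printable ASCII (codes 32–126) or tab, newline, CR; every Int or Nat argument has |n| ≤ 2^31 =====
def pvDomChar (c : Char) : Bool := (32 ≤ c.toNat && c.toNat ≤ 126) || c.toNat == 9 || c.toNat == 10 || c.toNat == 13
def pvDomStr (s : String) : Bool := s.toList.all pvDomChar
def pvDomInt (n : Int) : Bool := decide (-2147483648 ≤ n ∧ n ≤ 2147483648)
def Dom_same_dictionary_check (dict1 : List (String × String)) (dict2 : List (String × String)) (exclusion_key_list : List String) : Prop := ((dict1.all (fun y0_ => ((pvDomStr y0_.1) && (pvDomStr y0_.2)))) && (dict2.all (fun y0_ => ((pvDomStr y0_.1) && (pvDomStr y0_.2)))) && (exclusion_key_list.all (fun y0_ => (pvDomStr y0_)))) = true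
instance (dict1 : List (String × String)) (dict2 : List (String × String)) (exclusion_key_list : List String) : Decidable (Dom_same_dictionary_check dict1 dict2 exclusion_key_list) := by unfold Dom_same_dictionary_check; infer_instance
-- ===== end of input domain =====

-- B replaces A's copy-and-delete + dict equality by comparing key-sorted canonical association lists of the non-excluded items (alternative algorithm, same cost class).

-- ===== PORT A =====
-- Python dict == ignores insertion order: pyDictEq is that comparison (same size, every item of d found in d').
def pyDictEq (d d' : PySem.Dict String String) : Bool :=
  d.size == d'.size && d.items.all (fun p => d'.get? p.1 == some p.2)

-- port of A: copy both dicts, delete each exclusion key (KeyError ignored), compare dicts.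
def same_dictionary_check (dict1 : List (String × String)) (dict2 : List (String × String)) (exclusion_key_list : List String) : Bool :=
  let copies := (PySem.Dict.ofList dict1, PySem.Dict.ofList dict2)
  let res := exclusion_key_list.foldl (fun p k => (p.1.erase k, p.2.erase k)) copies
  if pyDictEq res.1 res.2 then true else false

-- ===== PORT B =====
-- _canon(d, exclusion_set): key-sorted association list of the non-excluded items.
def canonAssoc (d : List (String × String)) (exclusionSet : PySem.Set String) : List (String × String) :=
  PySem.List.sorted ((PySem.Dict.ofList d).items.filter
    (fun item => !(PySem.Set.contains exclusionSet item.1))) (fun item => item.1) false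

def same_dictionary_check_alt (dict1 : List (String × String)) (dict2 : List (String × String)) (exclusion_key_list : List String) : Bool :=
  let exclusionSet := PySem.Set.ofList exclusion_key_list
  canonAssoc dict1 exclusionSet == canonAssoc dict2 exclusionSet

-- ===== PRECONDITION & SPEC =====
def Spec_same_dictionary_check (dict1 : List (String × String)) (dict2 : List (String × String)) (exclusion_key_list : List String) (out : Bool) : Prop := out = same_dictionary_check_alt dict1 dict2 exclusion_key_list
instance (dict1 : List (String × String)) (dict2 : List (String × String)) (exclusion_key_list : List String) (out : Bool) : Decidable (Spec_same_dictionary_check dict1 dict2 exclusion_key_list out) := by unfold Spec_same_dictionary_check; infer_instance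

-- ===== CLAIM (what is proved, stated in full; the proofs are below) =====
def Claim_equal_same_dictionary_check : Prop := ∀ (dict1 : List (String × String)) (dict2 : List (String × String)) (exclusion_key_list : List String), Dom_same_dictionary_check dict1 dict2 exclusion_key_list → Spec_same_dictionary_check dict1 dict2 exclusion_key_list (same_dictionary_check dict1 dict2 exclusion_key_list)

-- ===== LEMMAS AND PROOFS =====

theorem if_bool (c : Bool) : (if c = true then true else false) = c := by cases c <;> simp

-- erasing every key of ks from d keeps exactly the items whose key is not in ks
theorem foldl_erase_eq_filter (ks : List String) (d : PySem.Dict String String) :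
    ks.foldl (fun d k => d.erase k) d
      = PySem.Dict.mk (d.items.filter (fun p => !(ks.contains p.1))) := by
  induction ks generalizing d with
  | nil => simp
  | cons k ks ih =>
      rw [List.foldl_cons, ih]
      simp only [PySem.Dict.erase, PySem.Dict.mk.injEq, List.filter_filter]
      apply List.filter_congr
      intro p _
      cases h : (p.1 == k) <;> simp_all [Bool.and_comm]

-- the pair fold of A is the two single folds
theorem foldl_pair_erase (ks : List String) (d1 d2 : PySem.Dict String String) :
    ks.foldl (fun p k => (p.1.erase k, p.2.erase k)) (d1, d2)
      = (ks.foldl (fun d k => d.erase k) d1, ks.foldl (fun d k => d.erase k) d2) := by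
  induction ks generalizing d1 d2 with
  | nil => rfl
  | cons k ks ih => simpa using ih (d1.erase k) (d2.erase k)

-- membership in the exclusion set is membership in the exclusion list
theorem contains_ofList_eq (ex : List String) (k : String) :
    PySem.Set.contains (PySem.Set.ofList ex) k = ex.contains k := by
  simp [PySem.Set.contains, pysem]

-- keys of the filtered items list stay Nodup
theorem nodup_keys_filtered (d : List (String × String)) (p : String × String → Bool) :
    (((PySem.Dict.ofList d).items.filter p).map Prod.fst).Nodup :=
  (List.filter_sublist.map Prod.fst).nodup (PySem.Dict.nodup_keys_ofList d)

-- with Nodup keys, Python dict equality is permutation of the items lists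
theorem pyDictEq_iff_perm (l1 l2 : List (String × String))
    (h1 : (l1.map Prod.fst).Nodup) (h2 : (l2.map Prod.fst).Nodup) :
    pyDictEq (PySem.Dict.mk l1) (PySem.Dict.mk l2) = true ↔ l1.Perm l2 := by
  unfold pyDictEq
  simp only [Bool.and_eq_true, beq_iff_eq, List.all_eq_true]
  constructor
  · rintro ⟨hlen, hmem⟩
    have hsub : l1 ⊆ l2 := by
      intro p hp
      have hg : (PySem.Dict.mk l2).get? p.1 = some p.2 := by simpa using hmem p hp
      have := PySem.Dict.mem_items_of_get?_eq_some _ hg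
      rw [← Prod.mk.eta (p := p)]
      simpa using this
    have hsp := List.subperm_of_subset (h1.of_map) hsub
    refine hsp.perm_of_length_le ?_
    have e1 : (PySem.Dict.mk l1).size = l1.length := rfl
    have e2 : (PySem.Dict.mk l2).size = l2.length := rfl
    omega
  · intro hp
    refine ⟨hp.length_eq, ?_⟩
    intro p hpm
    have hg := PySem.Dict.get?_of_mem_items (PySem.Dict.mk l2) (k := p.1) (v := p.2)
      (by simpa using hp.subset hpm) (by simpa using h2)
    simp [hg]

-- with Nodup keys, equality of the key-sorted lists is permutation of the lists
theorem sorted_eq_iff_perm (l1 l2 : List (String × String))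
    (h1 : (l1.map Prod.fst).Nodup) (_h2 : (l2.map Prod.fst).Nodup) :
    (PySem.List.sorted l1 (fun item => item.1) false
       = PySem.List.sorted l2 (fun item => item.1) false) ↔ l1.Perm l2 := by
  constructor
  · intro h
    exact (PySem.List.sorted_perm l1 (fun item => item.1) false).symm.trans
      (h ▸ PySem.List.sorted_perm l2 (fun item => item.1) false)
  · intro hp
    have hperm : (PySem.List.sorted l1 (fun item => item.1) false).Perm l2 :=
      (PySem.List.sorted_perm l1 (fun item => item.1) false).trans hp
    have hnd : ((PySem.List.sorted l1 (fun item => item.1) false).map Prod.fst).Nodup :=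
      ((PySem.List.sorted_perm l1 (fun item => item.1) false).map Prod.fst).nodup_iff.mpr h1
    have hle := PySem.List.sorted_pairwise (xs := l1) (key := fun item => item.1)
    have hne : (PySem.List.sorted l1 (fun item => item.1) false).Pairwise (fun a b => a.1 ≠ b.1) :=
      List.pairwise_map.mp hnd
    have hlt : (PySem.List.sorted l1 (fun item => item.1) false).Pairwise (fun a b => a.1 < b.1) :=
      (hle.and hne).imp (fun h => lt_of_le_of_ne h.1 h.2)
    exact (PySem.List.sorted_eq_of_perm_of_pairwise_lt l2 _ (fun item => item.1) hperm hlt).symm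

-- ===== VERDICT (by name: the statement is the Claim_ definition above) =====
theorem same_dictionary_check_spec : Claim_equal_same_dictionary_check := by
  intro dict1 dict2 ex _
  show same_dictionary_check dict1 dict2 ex = same_dictionary_check_alt dict1 dict2 ex
  unfold same_dictionary_check same_dictionary_check_alt canonAssoc
  simp only [foldl_pair_erase, foldl_erase_eq_filter]
  have hc : ∀ d : List (String × String),
      (PySem.Dict.ofList d).items.filter (fun p => !(ex.contains p.1))
        = (PySem.Dict.ofList d).items.filter (fun p => !(PySem.Set.contains (PySem.Set.ofList ex) p.1)) := by
    intro d; apply List.filter_congr; intro p _; rw [contains_ofList_eq]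
  rw [hc dict1, hc dict2]
  rw [if_bool]
  rw [Bool.eq_iff_iff, beq_iff_eq]
  rw [pyDictEq_iff_perm _ _ (nodup_keys_filtered _ _) (nodup_keys_filtered _ _),
      sorted_eq_iff_perm _ _ (nodup_keys_filtered _ _) (nodup_keys_filtered _ _)]
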